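-- pv_equiv track=rewrite | github.com/sarafanshul/Codes | CodeChef/encoding.py | encodeFun
-- ===== SOURCE A (Python) =====
-- def encodeFun(num):
--     s = str(num)
--     l = len(s)
--     d = {}
--     j = 0
--     Sum = 0
--
--     for i in range(1, l):
--         if(s[i] == s[i-1]): continue
--         else:
--             x = int(s[j])*(10**(l-j-1))
--             Sum += x
--             j = i
--     Sum += int(s[j])*(10**(l-j-1))
--
--     return Sum
-- ===== SOURCE B (Python) =====
-- def encodeFun(num):
--     # Pure integer arithmetic: peel digits from the least-significant end;
--     # a digit contributes digit*place exactly when the digit to its left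
--     # differs (or it is the leading digit).
--     n = num
--     total = 0
--     place = 1
--     while True:
--         n, d = divmod(n, 10)
--         if n == 0 or n % 10 != d:
--             total += d * place
--         if n == 0:
--             return total
--         place *= 10
-- ===== Notes on version B (the rewrite author's own statement) =====
-- stated objective: alternative
-- what changed: B never builds the decimal string: it peels digits off the integer with divmod from the least-significant end and adds d*place whenever the digit to the left differs (or is absent), replacing A's string scan with a lagged run-start pointer and post-loop tail addition.
-- outside the precondition, e.g. on encodeFun(-5): A raises ValueError, B does not finish within the time limit
import Mathlib
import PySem

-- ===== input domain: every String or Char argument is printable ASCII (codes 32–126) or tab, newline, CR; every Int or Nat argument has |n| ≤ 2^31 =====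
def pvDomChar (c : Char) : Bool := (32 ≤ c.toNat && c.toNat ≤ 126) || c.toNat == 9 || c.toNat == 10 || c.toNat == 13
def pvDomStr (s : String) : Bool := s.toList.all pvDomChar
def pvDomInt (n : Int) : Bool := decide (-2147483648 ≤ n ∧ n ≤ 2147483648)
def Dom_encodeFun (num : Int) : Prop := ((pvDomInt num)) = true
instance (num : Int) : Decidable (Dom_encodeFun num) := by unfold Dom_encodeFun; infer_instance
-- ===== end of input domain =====

-- B replaces A's string scan (lagged run-start pointer + post-loop tail addition) by pure
-- divmod arithmetic on the integer itself; objective: alternative (same cost class).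

-- ===== PORT A =====
-- int(s[j]) for a one-character string s[j] (ValueError → none, defaulted; under
-- Pre_encodeFun every accessed character is a decimal digit, so the default never fires)
def pvDigitVal (c : Char) : Int := (PySem.Int.ofChars? [c]).getD 0

-- the body of A's for-loop, state (j, Sum); s and l are the enclosing locals
def pvStepA (s : List Char) (l : Int) (st : Int × Int) (i : Int) : Int × Int :=
  if PySem.List.pyGetD s i ' ' = PySem.List.pyGetD s (i - 1) ' ' then st
  else (i, st.2 + pvDigitVal (PySem.List.pyGetD s st.1 ' ') * 10 ^ (l - st.1 - 1).toNat)
  -- exponent l - j - 1 is ≥ 0 throughout (j < l), so .toNat is exact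

def encodeFun (num : Int) : Int :=
  let s := PySem.Int.toChars num        -- s = str(num)  (Python's unused `d = {}` omitted)
  let l : Int := s.length
  let r := (PySem.List.pyRange 1 l 1).foldl (pvStepA s l) (0, 0)   -- for i in range(1, l)
  r.2 + pvDigitVal (PySem.List.pyGetD s r.1 ' ') * 10 ^ (l - r.1 - 1).toNat

-- ===== PORT B =====
-- the while-loop of Source B; under Pre_encodeFun num ≥ 0, so Nat / and % are exactly
-- Python's divmod(n, 10)
def pvLoopB (n : Nat) (place total : Int) : Int :=
  let d := n % 10
  let n' := n / 10
  let total' := if n' = 0 ∨ n' % 10 ≠ d then total + (d : Int) * place else total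
  if _h : n' = 0 then total'
  else pvLoopB n' (place * 10) total'
termination_by n
decreasing_by exact Nat.div_lt_self (by omega) (by omega)

def encodeFun_alt (num : Int) : Int := pvLoopB num.toNat 1 0

-- ===== PRECONDITION & SPEC =====
-- For num < 0, str(num) starts with '-' and A raises ValueError at int(s[0]); Pre_ excludes
-- exactly those inputs.
def Pre_encodeFun (num : Int) : Prop := 0 ≤ num
instance (num : Int) : Decidable (Pre_encodeFun num) := by unfold Pre_encodeFun; infer_instance
def pvWitness_encodeFun : Int := (1223)

def Spec_encodeFun (num : Int) (out : Int) : Prop := out = encodeFun_alt num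
instance (num : Int) (out : Int) : Decidable (Spec_encodeFun num out) := by unfold Spec_encodeFun; infer_instance

-- ===== CLAIM (what is proved, stated in full; the proofs are below) =====
def Claim_equal_encodeFun : Prop := ∀ (num : Int), Dom_encodeFun num → Pre_encodeFun num → Spec_encodeFun num (encodeFun num)

-- ===== LEMMAS AND PROOFS =====

-- B-side abstract value: the run-aware digit sum, least-significant first
def pvU (n : Nat) : Int :=
  if _h : n / 10 = 0 then ((n % 10 : Nat) : Int)
  else (if (n / 10) % 10 ≠ n % 10 then ((n % 10 : Nat) : Int) else 0) + 10 * pvU (n / 10)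
termination_by n
decreasing_by exact Nat.div_lt_self (by omega) (by omega)

-- decimal digit characters of n, most significant first
def pvDigCh (n : Nat) : List Char :=
  if _h : n < 10 then [Nat.digitChar n]
  else pvDigCh (n / 10) ++ [Nat.digitChar (n % 10)]
termination_by n
decreasing_by exact Nat.div_lt_self (by omega) (by omega)

lemma pvLoopB_eq : ∀ (n : Nat) (place total : Int),
    pvLoopB n place total = total + place * pvU n := by
  intro n
  induction n using Nat.strong_induction_on with
  | _ n ih =>
    intro place total
    rw [pvLoopB, pvU]
    by_cases h : n / 10 = 0
    · simp [h]; ring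
    · rw [dif_neg h, dif_neg h,
        ih (n / 10) (Nat.div_lt_self (by omega) (by omega)) (place * 10)]
      simp only [h, false_or]
      split_ifs with h2 <;> ring

lemma pvToDigitsCore_eq : ∀ (f n : Nat) (acc : List Char), n < f →
    Nat.toDigitsCore 10 f n acc = pvDigCh n ++ acc := by
  intro f
  induction f with
  | zero => omega
  | succ f ih =>
    intro n acc h
    rw [Nat.toDigitsCore]
    by_cases h10 : n / 10 = 0
    · have hn : n < 10 := by omega
      rw [pvDigCh, dif_pos hn]
      simp [h10, Nat.mod_eq_of_lt hn]
    · have hlt : n / 10 < f := by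
        have := Nat.div_lt_self (n := n) (by omega) (by omega : 1 < 10)
        omega
      rw [if_neg h10, ih (n / 10) _ hlt]
      conv_rhs => rw [pvDigCh, dif_neg (by omega : ¬ n < 10)]
      simp

lemma pvToChars_eq (num : Int) (h : 0 ≤ num) :
    PySem.Int.toChars num = pvDigCh num.toNat := by
  have h' : ¬ num < 0 := by omega
  simp [PySem.Int.toChars, h', Nat.toDigits,
    pvToDigitsCore_eq _ _ _ (Nat.lt_succ_self _)]

lemma pvDigCh_ne_nil (n : Nat) : pvDigCh n ≠ [] := by
  rw [pvDigCh]; split <;> simp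

lemma pvDigCh_getLast? (m : Nat) :
    (pvDigCh m).getLast? = some (Nat.digitChar (m % 10)) := by
  rw [pvDigCh]
  split
  · rename_i h; simp [Nat.mod_eq_of_lt h]
  · simp

lemma pvDigitVal_digitChar (d : Nat) (h : d < 10) :
    pvDigitVal (Nat.digitChar d) = (d : Int) := by
  interval_cases d <;> decide

lemma pvDigitChar_inj (a b : Nat) (ha : a < 10) (hb : b < 10) :
    (Nat.digitChar a = Nat.digitChar b) ↔ a = b := by
  interval_cases a <;> interval_cases b <;> decide

lemma pvGetD_append_lt (cs : List Char) (c : Char) (i : Int)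
    (h0 : 0 ≤ i) (h : i < (cs.length : Int)) :
    PySem.List.pyGetD (cs ++ [c]) i ' ' = PySem.List.pyGetD cs i ' ' := by
  rw [PySem.List.pyGetD_eq_getElem _ ' ' h0 (by rw [List.length_append]; push_cast; omega),
    PySem.List.pyGetD_eq_getElem _ ' ' h0 h]
  exact List.getElem_append_left (by omega)

lemma pvGetD_append_last (cs : List Char) (c : Char) :
    PySem.List.pyGetD (cs ++ [c]) (cs.length : Int) ' ' = c := by
  rw [PySem.List.pyGetD_eq_getElem _ ' ' (by positivity) (by simp)]
  simp

lemma pvGetD_last (cs : List Char) (hne : cs ≠ []) :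
    PySem.List.pyGetD cs ((cs.length : Int) - 1) ' ' = (cs.getLast?).getD ' ' := by
  have hpos : 0 < cs.length := List.length_pos_iff.mpr hne
  have hidx : (((cs.length : Int) - 1)).toNat = cs.length - 1 := by omega
  rw [PySem.List.pyGetD_eq_getElem _ ' ' (by omega) (by omega),
    List.getLast?_eq_getElem?, List.getElem?_eq_getElem (by omega), Option.getD_some]
  exact getElem_congr rfl hidx (by omega)

lemma pvFoldPair (cs : List Char) (c : Char) :
    ∀ (is : List Int), (∀ i ∈ is, 1 ≤ i ∧ i < (cs.length : Int)) →
    ∀ (j S : Int), 0 ≤ j → j < (cs.length : Int) →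
    (is.foldl (pvStepA (cs ++ [c]) ((cs.length : Int) + 1)) (j, 10 * S) =
      ((is.foldl (pvStepA cs (cs.length : Int)) (j, S)).1,
       10 * (is.foldl (pvStepA cs (cs.length : Int)) (j, S)).2)) ∧
    0 ≤ (is.foldl (pvStepA cs (cs.length : Int)) (j, S)).1 ∧
    (is.foldl (pvStepA cs (cs.length : Int)) (j, S)).1 < (cs.length : Int) := by
  intro is
  induction is with
  | nil => intro _ j S h0 h1; exact ⟨rfl, h0, h1⟩
  | cons i is ih =>
    intro hmem j S h0 h1
    obtain ⟨hi1, hi2⟩ := hmem i List.mem_cons_self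
    have hrest := fun x hx => hmem x (List.mem_cons_of_mem _ hx)
    simp only [List.foldl_cons]
    rw [show (pvStepA (cs ++ [c]) ((cs.length : Int) + 1) (j, 10 * S) i) =
      (if PySem.List.pyGetD (cs ++ [c]) i ' ' = PySem.List.pyGetD (cs ++ [c]) (i - 1) ' '
        then (j, 10 * S)
        else (i, 10 * S + pvDigitVal (PySem.List.pyGetD (cs ++ [c]) j ' ')
          * 10 ^ (((cs.length : Int) + 1) - j - 1).toNat)) from rfl]
    rw [show (pvStepA cs (cs.length : Int) (j, S) i) =
      (if PySem.List.pyGetD cs i ' ' = PySem.List.pyGetD cs (i - 1) ' '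
        then (j, S)
        else (i, S + pvDigitVal (PySem.List.pyGetD cs j ' ')
          * 10 ^ ((cs.length : Int) - j - 1).toNat)) from rfl]
    rw [pvGetD_append_lt cs c i (by omega) hi2,
      pvGetD_append_lt cs c (i - 1) (by omega) (by omega),
      pvGetD_append_lt cs c j h0 h1]
    split_ifs with hc
    · exact ih hrest j S h0 h1
    · have hexp : (((cs.length : Int) + 1) - j - 1).toNat
          = ((cs.length : Int) - j - 1).toNat + 1 := by omega
      rw [hexp, pow_succ]
      have harr : 10 * S + pvDigitVal (PySem.List.pyGetD cs j ' ')
            * (10 ^ ((cs.length : Int) - j - 1).toNat * 10)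
          = 10 * (S + pvDigitVal (PySem.List.pyGetD cs j ' ')
            * 10 ^ ((cs.length : Int) - j - 1).toNat) := by ring
      rw [harr]
      exact ih hrest i _ (by omega) hi2

-- A's whole computation as a function of the character list
def pvAfold (s : List Char) : Int :=
  let l : Int := s.length
  let r := (PySem.List.pyRange 1 l 1).foldl (pvStepA s l) (0, 0)
  r.2 + pvDigitVal (PySem.List.pyGetD s r.1 ' ') * 10 ^ (l - r.1 - 1).toNat

lemma pvAfold_digCh : ∀ (n : Nat), pvAfold (pvDigCh n) = pvU n := by
  intro n
  induction n using Nat.strong_induction_on with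
  | _ n ih =>
    by_cases h : n < 10
    · rw [pvDigCh, dif_pos h, pvU, dif_pos (by omega)]
      simp [pvAfold, PySem.List.pyRange_one_eq_nil (le_refl (1 : Int)),
        PySem.List.pyGetD_zero_cons, pvDigitVal_digitChar n h, Nat.mod_eq_of_lt h]
    · have hm : n / 10 < n := Nat.div_lt_self (by omega) (by omega)
      have ihm := ih (n / 10) hm
      rw [pvDigCh, dif_neg h, pvU, dif_neg (by omega)]
      set cs := pvDigCh (n / 10) with hcs
      set c := Nat.digitChar (n % 10) with hc
      have hne : cs ≠ [] := pvDigCh_ne_nil _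
      have hlen : 1 ≤ (cs.length : Int) := by
        have := List.length_pos_iff.mpr hne; omega
      have hL : (((cs ++ [c]).length : Nat) : Int) = (cs.length : Int) + 1 := by
        simp
      simp only [pvAfold, hL]
      rw [show pvU (n / 10) = pvAfold cs from ihm.symm]
      simp only [pvAfold]
      rw [PySem.List.pyRange_one_succ_right hlen, List.foldl_append]
      rw [show ((0 : Int), (0 : Int)) = ((0 : Int), 10 * (0 : Int)) by norm_num]
      obtain ⟨hfp, hj0, hj1⟩ := pvFoldPair cs c (PySem.List.pyRange 1 (cs.length : Int) 1)
        (fun i hi => by rw [PySem.List.mem_pyRange_one] at hi; exact hi) 0 0 le_rfl (by omega)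
      rw [hfp]
      set r := List.foldl (pvStepA cs (cs.length : Int)) (0, 0)
        (PySem.List.pyRange 1 (cs.length : Int) 1) with hr
      simp only [List.foldl_cons, List.foldl_nil]
      have hlast : PySem.List.pyGetD (cs ++ [c]) ((cs.length : Int) - 1) ' '
          = Nat.digitChar (n / 10 % 10) := by
        rw [pvGetD_append_lt cs c _ (by omega) (by omega), pvGetD_last cs hne,
          pvDigCh_getLast?]
        rfl
      have hat : PySem.List.pyGetD (cs ++ [c]) (cs.length : Int) ' ' = c :=
        pvGetD_append_last cs c
      simp only [pvStepA, hat, hlast]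
      have hexp : ((cs.length : Int) + 1 - r.1 - 1).toNat
          = ((cs.length : Int) - r.1 - 1).toNat + 1 := by omega
      by_cases hd : n % 10 = n / 10 % 10
      · rw [if_pos (by rw [hc, pvDigitChar_inj _ _ (by omega) (by omega)]; exact hd)]
        rw [if_neg (by omega)]
        dsimp only
        rw [pvGetD_append_lt cs c r.1 hj0 hj1, hexp, pow_succ]
        rw [hr]
        push_cast
        ring
      · rw [if_neg (by rw [hc, pvDigitChar_inj _ _ (by omega) (by omega)]; exact hd)]
        rw [if_pos (by omega)]
        dsimp only
        rw [pvGetD_append_lt cs c r.1 hj0 hj1, hexp, pow_succ, hat]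
        have hdv : pvDigitVal c = ((n % 10 : Nat) : Int) :=
          pvDigitVal_digitChar _ (by omega)
        rw [hdv]
        have h0 : ((cs.length : Int) + 1 - (cs.length : Int) - 1).toNat = 0 := by omega
        rw [h0, pow_zero]
        rw [hr]
        push_cast
        ring

lemma encodeFun_eq_pvAfold (num : Int) :
    encodeFun num = pvAfold (PySem.Int.toChars num) := rfl

-- ===== VERDICT (by name: the statement is the Claim_ definition above) =====
theorem encodeFun_spec : Claim_equal_encodeFun := by
  intro num _ hpre
  show encodeFun num = encodeFun_alt num
  rw [encodeFun_eq_pvAfold, pvToChars_eq num hpre, pvAfold_digCh,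
    encodeFun_alt, pvLoopB_eq]
  ring
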